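-- pv_equiv track=rewrite | github.com/nishinia/Z | upgrade_to_v062.py | detect_root_prefix
-- ===== SOURCE A (Python) =====
-- def detect_root_prefix(names):
--     targets = [
--         "00_README.txt",
--         "manifest.json",
--         "validation_report.txt",
--     ]
--
--     for target in targets:
--         for name in names:
--             n = name.replace("\\", "/")
--             if n.endswith(target):
--                 return n[:-len(target)]
--
--     return ""
-- ===== SOURCE B (Python) =====
-- def detect_root_prefix(names):
--     targets = [
--         "00_README.txt",
--         "manifest.json",
--         "validation_report.txt",
--     ]
--
--     found = {}
--     for name in names:
--         n = name.replace("\\", "/")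
--         for target in targets:
--             if n.endswith(target) and target not in found:
--                 found[target] = n[:-len(target)]
--
--     for target in targets:
--         if target in found:
--             return found[target]
--     return ""
-- ===== Notes on version B (the rewrite author's own statement) =====
-- stated objective: alternative
-- what changed: Replaces three full scans of names (one per target, with early return) by a single pass that builds a first-match-per-target dict, followed by a priority selection over the three targets.
import Mathlib
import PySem

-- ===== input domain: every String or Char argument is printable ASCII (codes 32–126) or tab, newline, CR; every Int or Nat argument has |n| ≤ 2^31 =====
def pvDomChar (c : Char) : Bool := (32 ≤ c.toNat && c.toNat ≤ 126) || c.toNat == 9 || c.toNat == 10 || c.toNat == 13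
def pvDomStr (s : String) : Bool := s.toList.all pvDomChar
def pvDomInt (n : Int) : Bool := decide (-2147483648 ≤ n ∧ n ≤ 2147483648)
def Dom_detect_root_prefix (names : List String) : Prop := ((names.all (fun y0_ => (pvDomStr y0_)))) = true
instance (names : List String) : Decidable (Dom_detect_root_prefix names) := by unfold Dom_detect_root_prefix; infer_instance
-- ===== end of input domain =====

-- B builds a first-match-per-target dict in a single pass over names, then selects by target priority; A scans names once per target.

-- shared: the fixed marker list and the stripped prefix n[:-len(target)]
def pvTargets : List String := ["00_README.txt", "manifest.json", "validation_report.txt"]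
def pvPfx (n target : String) : String :=
  PySem.Str.slice n none (some (-(PySem.Str.len target : Int)))

-- ===== PORT A =====
-- A's inner loop: first name (normalized) ending with target, returning its stripped prefix
def pvInnerA (target : String) : List String → Option String
  | [] => none
  | name :: rest =>
    let n := PySem.Str.replace name "\\" "/"
    if PySem.Str.endswith n target then some (pvPfx n target) else pvInnerA target rest

-- A's outer loop over targets with early return
def pvOuterA (names : List String) : List String → String
  | [] => ""
  | t :: ts =>
    match pvInnerA t names with
    | some p => p
    | none => pvOuterA names ts

def detect_root_prefix (names : List String) : String := pvOuterA names pvTargets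

-- ===== PORT B =====
-- B's per-name step: record the prefix for each matched target not already present
def pvStep (d : PySem.Dict String String) (name : String) : PySem.Dict String String :=
  let n := PySem.Str.replace name "\\" "/"
  pvTargets.foldl
    (fun d target =>
      if PySem.Str.endswith n target && !(d.contains target) then
        d.insert target (pvPfx n target)
      else d)
    d

-- B's final loop: first target present in the dict wins
def pvSelect (found : PySem.Dict String String) : List String → String
  | [] => ""
  | t :: ts =>
    match found.get? t with
    | some p => p
    | none => pvSelect found ts

def detect_root_prefix_alt (names : List String) : String :=
  pvSelect (names.foldl pvStep PySem.Dict.empty) pvTargets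

-- ===== PRECONDITION & SPEC =====
def Spec_detect_root_prefix (names : List String) (out : String) : Prop := out = detect_root_prefix_alt names
instance (names : List String) (out : String) : Decidable (Spec_detect_root_prefix names out) := by unfold Spec_detect_root_prefix; infer_instance

-- ===== CLAIM (what is proved, stated in full; the proofs are below) =====
def Claim_equal_detect_root_prefix : Prop := ∀ (names : List String), Dom_detect_root_prefix names → Spec_detect_root_prefix names (detect_root_prefix names)

-- ===== LEMMAS AND PROOFS =====

-- the inner fold over targets (abstract match test p, prefix map f), lookup at t:
-- only the FIRST match per key is stored
lemma pv_targets_foldl_get? (ts : List String) (d : PySem.Dict String String)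
    (p : String → Bool) (f : String → String) (t : String) :
    (ts.foldl
      (fun d target =>
        if p target && !(d.contains target) then d.insert target (f target) else d) d).get? t
    = if t ∈ ts ∧ p t = true ∧ d.get? t = none then some (f t) else d.get? t := by
  induction ts generalizing d with
  | nil => simp
  | cons t' ts ih =>
    simp only [List.foldl_cons]
    by_cases hb : (p t' && !(d.contains t')) = true
    · rw [if_pos hb, ih, PySem.Dict.get?_insert]
      simp only [Bool.and_eq_true, Bool.not_eq_true'] at hb
      have hdn : d.get? t' = none := by
        rw [PySem.Dict.contains_eq_isSome_get?] at hb
        cases hg : d.get? t' with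
        | none => rfl
        | some v => rw [hg] at hb; simp at hb
      by_cases h : t = t'
      · subst h
        rw [if_pos rfl, if_neg (fun hh => Option.some_ne_none _ hh.2.2),
          if_pos ⟨List.mem_cons_self, hb.1, hdn⟩]
      · rw [if_neg h]
        simp only [List.mem_cons, h, false_or]
    · rw [if_neg hb, ih]
      by_cases h : t = t'
      · subst h
        by_cases hC : p t = true ∧ d.get? t = none
        · exfalso
          apply hb
          rw [Bool.and_eq_true]
          refine ⟨hC.1, ?_⟩
          rw [Bool.not_eq_true', PySem.Dict.contains_eq_isSome_get?, hC.2]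
          rfl
        · rw [if_neg (fun hh => hC ⟨hh.2.1, hh.2.2⟩), if_neg (fun hh => hC ⟨hh.2.1, hh.2.2⟩)]
      · simp only [List.mem_cons, h, false_or]

-- after the single pass, lookup at a target t equals A's scan for t, behind whatever d already holds
lemma pv_foldl_get? (names : List String) (d : PySem.Dict String String) (t : String)
    (ht : t ∈ pvTargets) :
    (names.foldl pvStep d).get? t = (d.get? t).or (pvInnerA t names) := by
  induction names generalizing d with
  | nil => cases hd : d.get? t <;> simp [hd, pvInnerA]
  | cons name rest ih =>
    simp only [List.foldl_cons, ih, pvInnerA]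
    rw [show pvStep d name = pvTargets.foldl
      (fun d target =>
        if PySem.Str.endswith (PySem.Str.replace name "\\" "/") target && !(d.contains target) then
          d.insert target (pvPfx (PySem.Str.replace name "\\" "/") target)
        else d) d from rfl]
    rw [pv_targets_foldl_get?]
    cases hd : d.get? t with
    | some v =>
      rw [if_neg (fun hh => Option.some_ne_none _ hh.2.2)]
      simp [Option.or]
    | none =>
      by_cases hE : PySem.Str.endswith (PySem.Str.replace name "\\" "/") t = true
      · rw [if_pos ⟨ht, hE, rfl⟩, if_pos hE]
        simp [Option.or]
      · rw [if_neg (fun hh => hE hh.2.1), if_neg hE]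

theorem pv_main (names : List String) : detect_root_prefix names = detect_root_prefix_alt names := by
  unfold detect_root_prefix detect_root_prefix_alt
  have h : ∀ t ∈ pvTargets, (names.foldl pvStep PySem.Dict.empty).get? t = pvInnerA t names := by
    intro t ht
    rw [pv_foldl_get? names PySem.Dict.empty t ht, PySem.Dict.get?_empty]
    rfl
  show pvOuterA names pvTargets = pvSelect (names.foldl pvStep PySem.Dict.empty) pvTargets
  have hsub : ∀ ts : List String, (∀ t ∈ ts, (names.foldl pvStep PySem.Dict.empty).get? t = pvInnerA t names) →
      pvOuterA names ts = pvSelect (names.foldl pvStep PySem.Dict.empty) ts := by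
    intro ts hts
    induction ts with
    | nil => rfl
    | cons t ts ih =>
      simp only [pvOuterA, pvSelect, hts t (by simp)]
      cases pvInnerA t names <;> simp [ih (fun t ht => hts t (by simp [ht]))]
  exact hsub pvTargets h

-- ===== VERDICT (by name: the statement is the Claim_ definition above) =====
theorem detect_root_prefix_spec : Claim_equal_detect_root_prefix := by
  intro names _
  exact pv_main names
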